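-- pv_equiv track=rewrite | github.com/austral-prog/tp-6-loops-santinopesce00 | enumerate_list.py | enumerate_list
-- ===== SOURCE A (Python) =====
-- def enumerate_list(lst):
--     """
--     Dada una lista de strings, retorna una nueva lista donde cada elemento
--     tiene el formato "indice. valor". Los strings vacios se deben saltear
--     y no deben aparecer en la lista resultante.
--     El indice debe ser consecutivo (no el indice original).
--
--     Ejemplo: enumerate_list(["Red", "Green", "", "White"]) -> ["0. Red", "1. Green", "2. White"]
--     """
--     lista = []
--     i = 0
--     for elemento in lst:
--          if elemento != "":
--             lista.append(f"{i}. {elemento}")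
--             i = i + 1
--     return lista
-- ===== SOURCE B (Python) =====
-- def enumerate_list(lst):
--     # Right-to-left strategy: first count the non-empty strings, then walk the
--     # list in reverse assigning decreasing indices, and reverse the built output.
--     i = sum(1 for e in lst if e != "")
--     rev = []
--     for e in reversed(lst):
--         if e != "":
--             i -= 1
--             rev.append(f"{i}. {e}")
--     rev.reverse()
--     return rev
-- ===== Notes on version B (the rewrite author's own statement) =====
-- stated objective: alternative
-- what changed: Replaces A's forward pass with an incrementing counter by a count-then-backward pass: B first counts the non-empty strings, then traverses the list right-to-left assigning decreasing indices and builds the output back-to-front, reversing it at the end.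
import Mathlib
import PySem

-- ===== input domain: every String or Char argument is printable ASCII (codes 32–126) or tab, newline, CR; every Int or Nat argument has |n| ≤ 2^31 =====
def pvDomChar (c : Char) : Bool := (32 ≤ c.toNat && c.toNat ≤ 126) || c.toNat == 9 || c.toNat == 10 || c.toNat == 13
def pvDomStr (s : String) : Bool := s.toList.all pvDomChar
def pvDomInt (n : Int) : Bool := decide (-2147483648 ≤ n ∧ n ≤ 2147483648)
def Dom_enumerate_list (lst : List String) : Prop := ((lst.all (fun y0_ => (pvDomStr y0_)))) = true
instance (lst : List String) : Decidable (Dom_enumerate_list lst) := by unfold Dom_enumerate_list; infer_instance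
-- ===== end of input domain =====

-- B numbers the non-empty strings by a count-then-backward traversal with decreasing indices instead of A's forward pass with an incrementing counter (alternative decomposition, same cost).


-- ===== PORT A =====
-- single forward pass: append "i. elem" and bump the counter for each non-empty element
def enumerate_list (lst : List String) : List String :=
  (lst.foldl
    (fun (st : List String × Int) elemento =>
      if elemento ≠ "" then
        (st.1 ++ [PySem.Int.toStr st.2 ++ ". " ++ elemento], st.2 + 1)
      else st)
    ([], 0)).1

-- ===== PORT B =====
-- count the non-empty strings, then walk the list in reverse assigning
-- decreasing indices, building the output back-to-front; reverse it at the end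
def enumerate_list_alt (lst : List String) : List String :=
  let i0 : Int := lst.foldl (fun n e => if e ≠ "" then n + 1 else n) 0
  let st := lst.reverse.foldl
    (fun (st : Int × List String) e =>
      if e ≠ "" then (st.1 - 1, st.2 ++ [PySem.Int.toStr (st.1 - 1) ++ ". " ++ e])
      else st)
    (i0, [])
  st.2.reverse

-- ===== PRECONDITION & SPEC =====
def Spec_enumerate_list (lst : List String) (out : List String) : Prop := out = enumerate_list_alt lst
instance (lst : List String) (out : List String) : Decidable (Spec_enumerate_list lst out) := by unfold Spec_enumerate_list; infer_instance

-- ===== CLAIM (what is proved, stated in full; the proofs are below) =====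
def Claim_equal_enumerate_list : Prop := ∀ (lst : List String), Dom_enumerate_list lst → Spec_enumerate_list lst (enumerate_list lst)

-- ===== LEMMAS AND PROOFS =====
-- reference numbering: attach ascending indices starting at i
def pvNum (l : List String) (i : Int) : List String :=
  match l with
  | [] => []
  | x :: xs => (PySem.Int.toStr i ++ ". " ++ x) :: pvNum xs (i + 1)

theorem pvNum_append (l : List String) (x : String) (i : Int) :
    pvNum (l ++ [x]) i = pvNum l i ++ [PySem.Int.toStr (i + l.length) ++ ". " ++ x] := by
  induction l generalizing i with
  | nil => simp [pvNum]
  | cons y ys ih =>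
    simp only [List.cons_append, pvNum, ih, List.length_cons]
    push_cast
    ring_nf

-- A's fold from state (acc, i) equals acc ++ numbering of the filtered tail from i
theorem foldA_eq (lst : List String) (acc : List String) (i : Int) :
    (lst.foldl
      (fun (st : List String × Int) elemento =>
        if elemento ≠ "" then
          (st.1 ++ [PySem.Int.toStr st.2 ++ ". " ++ elemento], st.2 + 1)
        else st)
      (acc, i)).1
    = acc ++ pvNum (lst.filter (fun e => e ≠ "")) i := by
  induction lst generalizing acc i with
  | nil => simp [pvNum]
  | cons x xs ih =>
    by_cases hx : x = ""
    · subst hx; rw [List.foldl_cons]; simpa using ih acc i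
    · simp only [List.foldl_cons, List.filter_cons, ne_eq, hx, not_false_eq_true,
        decide_true, if_true, pvNum, ih, List.append_assoc, List.singleton_append]

-- B's counting fold equals the starting value plus the filtered length
theorem foldCount_eq (lst : List String) (k : Int) :
    lst.foldl (fun n e => if e ≠ "" then n + 1 else n) k
      = k + (lst.filter (fun e => e ≠ "")).length := by
  induction lst generalizing k with
  | nil => simp
  | cons x xs ih =>
    by_cases hx : x = ""
    · subst hx; simpa using ih k
    · simp only [List.foldl_cons, ne_eq, hx, not_false_eq_true, if_true,
        List.filter_cons, decide_true, List.length_cons, ih]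
      push_cast
      ring

-- B's backward loop: processing ys with counter i appends, in reverse, the
-- ascending numbering of (filter ys).reverse starting at i - |filter ys|
theorem foldB_eq (ys : List String) (i : Int) (acc : List String) :
    (ys.foldl
      (fun (st : Int × List String) e =>
        if e ≠ "" then (st.1 - 1, st.2 ++ [PySem.Int.toStr (st.1 - 1) ++ ". " ++ e])
        else st)
      (i, acc)).2
    = acc ++ (pvNum ((ys.filter (fun e => e ≠ "")).reverse)
        (i - (ys.filter (fun e => e ≠ "")).length)).reverse := by
  induction ys generalizing i acc with
  | nil => simp [pvNum]
  | cons x xs ih =>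
    by_cases hx : x = ""
    · subst hx
      rw [List.foldl_cons, if_neg (by simp), List.filter_cons_of_neg (by simp)]
      exact ih i acc
    · rw [List.foldl_cons, if_pos hx, List.filter_cons_of_pos (by simp [hx])]
      rw [ih, List.reverse_cons, pvNum_append, List.reverse_append,
          List.reverse_singleton, List.length_reverse, List.length_cons]
      push_cast
      have h1 : i - (((xs.filter (fun e => e ≠ "")).length : Int) + 1)
          + ((xs.filter (fun e => e ≠ "")).length : Int) = i - 1 := by ring
      have h2 : i - (((xs.filter (fun e => e ≠ "")).length : Int) + 1)
          = i - 1 - ((xs.filter (fun e => e ≠ "")).length : Int) := by ring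
      rw [h1, h2]
      simp [List.append_assoc]

-- ===== VERDICT (by name: the statement is the Claim_ definition above) =====
theorem enumerate_list_spec : Claim_equal_enumerate_list := by
  intro lst _
  unfold Spec_enumerate_list enumerate_list enumerate_list_alt
  simp only [foldA_eq, foldCount_eq, foldB_eq, List.filter_reverse,
    List.reverse_reverse, List.length_reverse, List.nil_append]
  congr 1
  ring
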